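-- pv_equiv track=rewrite | github.com/SpeekeR99/TSP_Kimlova_Savel_Slechta_Vdoviak_Zappe | ai/src/utils.py | get_num_of_rects_per_page
-- ===== SOURCE A (Python) =====
-- def get_num_of_rects_per_page(num_of_rect, num_of_pages, num_of_rects_per_page):
--     """
--     Calculate the number of rectangles in each page
--     :param num_of_rect: Total number of rectangles
--     :param num_of_pages: Total number of pages
--     :param num_of_rects_per_page: Number of rectangles that can fit in a page
--     :return: List of number of rectangles in each page
--     """
--     # Calculate the number of rectangles in each page
--     num_of_rects_in_page = []
--     for page in range(num_of_pages):
--         # If it is the last page and the last rectangle has fewer questions than the rest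
--         if page == num_of_pages - 1 and num_of_rect % num_of_rects_per_page != 0:
--             num_of_rects_in_page.append(num_of_rect % num_of_rects_per_page)
--         # Otherwise, add the maximum number of rectangles that can fit in a page
--         else:
--             num_of_rects_in_page.append(num_of_rects_per_page)
--
--     return num_of_rects_in_page
-- ===== SOURCE B (Python) =====
-- def get_num_of_rects_per_page(num_of_rect, num_of_pages, num_of_rects_per_page):
--     """
--     Build the per-page rectangle counts back-to-front: start from the last
--     page (remainder if the total does not divide evenly, else a full page),
--     append a full page count for every remaining page, then reverse.
--     """
--     if num_of_pages <= 0: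
--         return []
--     rem = num_of_rect % num_of_rects_per_page
--     backwards = [rem if rem != 0 else num_of_rects_per_page]
--     for _ in range(num_of_pages - 1):
--         backwards.append(num_of_rects_per_page)
--     return list(reversed(backwards))
-- ===== Notes on version B (the rewrite author's own statement) =====
-- stated objective: alternative
-- what changed: B constructs the list back-to-front: the last page's count (remainder or full page) is computed once up front as the head, full-page counts are appended for the remaining pages, and the list is reversed, removing A's per-element index-vs-last-page branch inside the loop.
import Mathlib
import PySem

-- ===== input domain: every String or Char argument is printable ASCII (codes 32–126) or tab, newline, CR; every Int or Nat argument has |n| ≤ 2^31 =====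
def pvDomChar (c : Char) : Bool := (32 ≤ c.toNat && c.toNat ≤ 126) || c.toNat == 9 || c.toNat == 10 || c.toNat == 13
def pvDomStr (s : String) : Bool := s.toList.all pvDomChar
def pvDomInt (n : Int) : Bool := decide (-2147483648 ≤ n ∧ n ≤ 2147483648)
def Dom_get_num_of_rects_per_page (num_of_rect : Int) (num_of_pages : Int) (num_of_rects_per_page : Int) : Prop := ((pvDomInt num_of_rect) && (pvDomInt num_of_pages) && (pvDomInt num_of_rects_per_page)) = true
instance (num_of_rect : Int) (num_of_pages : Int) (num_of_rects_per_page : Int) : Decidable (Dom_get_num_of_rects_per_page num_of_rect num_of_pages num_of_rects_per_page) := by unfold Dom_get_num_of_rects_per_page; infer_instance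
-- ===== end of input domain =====

-- B builds the list back-to-front: the last page's count (remainder or full page) is the
-- head, full pages are appended, and the list is reversed — no per-element branch. Objective: alternative.

-- ===== PORT A =====
def get_num_of_rects_per_page (num_of_rect : Int) (num_of_pages : Int) (num_of_rects_per_page : Int) : List Int :=
  (PySem.List.pyRange 0 num_of_pages 1).foldl
    (fun num_of_rects_in_page page =>
      if page = num_of_pages - 1 ∧ PySem.Int.mod num_of_rect num_of_rects_per_page ≠ 0 then
        num_of_rects_in_page ++ [PySem.Int.mod num_of_rect num_of_rects_per_page]
      else
        num_of_rects_in_page ++ [num_of_rects_per_page]) []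

-- ===== PORT B =====
def get_num_of_rects_per_page_alt (num_of_rect : Int) (num_of_pages : Int) (num_of_rects_per_page : Int) : List Int :=
  if num_of_pages ≤ 0 then []
  else
    let rem := PySem.Int.mod num_of_rect num_of_rects_per_page
    let backwards := (PySem.List.pyRange 0 (num_of_pages - 1) 1).foldl
      (fun acc _ => acc ++ [num_of_rects_per_page])
      [if rem ≠ 0 then rem else num_of_rects_per_page]
    backwards.reverse

-- ===== PRECONDITION & SPEC =====
-- Pre_ excludes exactly the inputs where Python A raises ZeroDivisionError
-- (num_of_pages > 0 with num_of_rects_per_page == 0); B raises there too.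
def Pre_get_num_of_rects_per_page (num_of_rect : Int) (num_of_pages : Int) (num_of_rects_per_page : Int) : Prop :=
  num_of_pages ≤ 0 ∨ num_of_rects_per_page ≠ 0
instance (num_of_rect : Int) (num_of_pages : Int) (num_of_rects_per_page : Int) : Decidable (Pre_get_num_of_rects_per_page num_of_rect num_of_pages num_of_rects_per_page) := by unfold Pre_get_num_of_rects_per_page; infer_instance
def pvWitness_get_num_of_rects_per_page : Int × Int × Int := (7, 3, 3)

def Spec_get_num_of_rects_per_page (num_of_rect : Int) (num_of_pages : Int) (num_of_rects_per_page : Int) (out : List Int) : Prop := out = get_num_of_rects_per_page_alt num_of_rect num_of_pages num_of_rects_per_page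
instance (num_of_rect : Int) (num_of_pages : Int) (num_of_rects_per_page : Int) (out : List Int) : Decidable (Spec_get_num_of_rects_per_page num_of_rect num_of_pages num_of_rects_per_page out) := by unfold Spec_get_num_of_rects_per_page; infer_instance

-- ===== CLAIM =====
def Claim_equal_get_num_of_rects_per_page : Prop := ∀ (num_of_rect : Int) (num_of_pages : Int) (num_of_rects_per_page : Int), Dom_get_num_of_rects_per_page num_of_rect num_of_pages num_of_rects_per_page → Pre_get_num_of_rects_per_page num_of_rect num_of_pages num_of_rects_per_page → Spec_get_num_of_rects_per_page num_of_rect num_of_pages num_of_rects_per_page (get_num_of_rects_per_page num_of_rect num_of_pages num_of_rects_per_page)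

-- ===== LEMMAS AND PROOFS =====

-- A's fold is a map over the page range.
theorem getA_eq_map (r p q : Int) :
    get_num_of_rects_per_page r p q =
      (PySem.List.pyRange 0 p 1).map
        (fun page => if page = p - 1 ∧ PySem.Int.mod r q ≠ 0 then PySem.Int.mod r q else q) := by
  unfold get_num_of_rects_per_page
  have h : (fun (acc : List Int) (page : Int) =>
      if page = p - 1 ∧ PySem.Int.mod r q ≠ 0 then acc ++ [PySem.Int.mod r q] else acc ++ [q])
      = fun acc page => acc ++ [if page = p - 1 ∧ PySem.Int.mod r q ≠ 0 then PySem.Int.mod r q else q] := by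
    funext acc page; split <;> rfl
  rw [h, PySem.List.foldl_append_singleton_eq_map]
  simp

-- All pages before the last map to the full-page count.
theorem map_init_const (r p q : Int) :
    (PySem.List.pyRange 0 (p - 1) 1).map
        (fun page => if page = p - 1 ∧ PySem.Int.mod r q ≠ 0 then PySem.Int.mod r q else q)
      = List.replicate (p - 1).toNat q := by
  have : ∀ x ∈ PySem.List.pyRange 0 (p - 1) 1,
      (if x = p - 1 ∧ PySem.Int.mod r q ≠ 0 then PySem.Int.mod r q else q) = q := by
    intro x hx
    rw [PySem.List.mem_pyRange_one] at hx
    have : x ≠ p - 1 := by omega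
    simp [this]
  rw [List.map_congr_left this, List.map_const']
  simp [PySem.List.length_pyRange_one]

-- B's append-loop is init followed by a replicate.
theorem foldl_append_const {α : Type} (l : List α) (init : List Int) (q : Int) :
    l.foldl (fun acc _ => acc ++ [q]) init = init ++ List.replicate l.length q := by
  induction l generalizing init with
  | nil => simp
  | cons x xs ih =>
      simp only [List.foldl_cons, List.length_cons, ih]
      rw [List.replicate_succ]
      simp

-- ===== VERDICT =====
theorem get_num_of_rects_per_page_spec : Claim_equal_get_num_of_rects_per_page := by
  unfold Claim_equal_get_num_of_rects_per_page
  intro r p q _ _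
  unfold Spec_get_num_of_rects_per_page
  rw [getA_eq_map]
  unfold get_num_of_rects_per_page_alt
  by_cases hp : p ≤ 0
  · have : PySem.List.pyRange 0 p 1 = [] := PySem.List.pyRange_one_eq_nil (by omega)
    simp [this, hp]
  · simp only [if_neg hp]
    have hsplit : PySem.List.pyRange 0 p 1 = PySem.List.pyRange 0 (p - 1) 1 ++ [p - 1] := by
      have := PySem.List.pyRange_one_succ_right (a := 0) (b := p - 1) (by omega)
      simpa [show p - 1 + 1 = p by ring] using this
    rw [hsplit, List.map_append, map_init_const, foldl_append_const]
    simp only [PySem.List.length_pyRange_one, List.reverse_append, List.reverse_cons,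
      List.reverse_nil, List.reverse_replicate]
    by_cases hrem : PySem.Int.mod r q ≠ 0 <;>
      simp [hrem, List.map_cons]
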